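-- pv_equiv track=rewrite | github.com/Sh3mm/CSV-cleaner | cleaner.py | remove_doubles
-- ===== SOURCE A (Python) =====
-- from typing import List, Tuple
--
-- def remove_doubles(header: List[str], rows: List[List[str]]) -> Tuple[List[str], List[List[str]], List[str]]:
--     error = []
--     new_header = []
--     mem = {}
--
--     for col in header:
--         if header.count(col) > 1:
--             mem[col] = mem.get(col, 0) + 1
--             new_header.append(col + str(mem[col]))
--             if mem[col] == 1:
--                 error.append(f"WARNING: SameColumnNameWarning '{col}' in file: {'{path}'} \n")
--         else:
--             new_header.append(col)
--
--     return new_header, rows, error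
-- ===== SOURCE B (Python) =====
-- from typing import List, Tuple
--
-- def remove_doubles(header: List[str], rows: List[List[str]]) -> Tuple[List[str], List[List[str]], List[str]]:
--     # One counting pass, then a single backward scan: the remaining-count dict
--     # directly yields each duplicate's rank, so no per-column list.count rescans.
--     counts = {}
--     for col in header:
--         counts[col] = counts.get(col, 0) + 1
--     totals = dict(counts)
--     new_header = []
--     error = []
--     for col in reversed(header):
--         k = counts[col]
--         counts[col] = k - 1
--         if totals[col] > 1:
--             new_header.append(col + str(k))
--             if k == 1:
--                 error.append(f"WARNING: SameColumnNameWarning '{col}' in file: {'{path}'} \n")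
--         else:
--             new_header.append(col)
--     new_header.reverse()
--     error.reverse()
--     return new_header, rows, error
-- ===== Notes on version B (the rewrite author's own statement) =====
-- stated objective: faster
-- what changed: A rescans the whole header with header.count inside its loop and tracks ranks with a forward running dict; B counts all columns once, then does a single backward scan in which the remaining-count dict itself gives each duplicate's rank, building both outputs back-to-front and reversing them.
import Mathlib
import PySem

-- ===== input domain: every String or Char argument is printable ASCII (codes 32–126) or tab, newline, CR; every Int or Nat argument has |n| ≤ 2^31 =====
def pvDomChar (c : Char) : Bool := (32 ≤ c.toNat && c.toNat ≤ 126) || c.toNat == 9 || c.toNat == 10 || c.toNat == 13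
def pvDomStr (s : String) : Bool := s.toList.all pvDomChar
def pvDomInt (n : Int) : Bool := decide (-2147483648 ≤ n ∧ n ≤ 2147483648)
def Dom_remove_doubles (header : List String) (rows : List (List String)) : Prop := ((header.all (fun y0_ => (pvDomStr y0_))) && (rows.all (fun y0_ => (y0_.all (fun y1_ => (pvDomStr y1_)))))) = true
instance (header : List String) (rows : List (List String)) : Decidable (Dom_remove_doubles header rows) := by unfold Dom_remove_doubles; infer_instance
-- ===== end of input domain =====

-- B replaces A's quadratic header.count rescans by one counting pass plus a single
-- backward scan whose remaining-count dict yields each duplicate's rank directly (faster).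


-- the f-string warning message (identical in both Pythons)
def pvWarn (c : String) : String := "WARNING: SameColumnNameWarning '" ++ c ++ "' in file: {path} \n"

-- ===== PORT A =====
def remove_doubles (header : List String) (rows : List (List String)) : List String × List (List String) × List String :=
  -- state (error, new_header, mem), exactly A's loop
  let r := header.foldl (fun st col =>
      let error := st.1
      let new_header := st.2.1
      let mem := st.2.2
      if PySem.List.count header col > 1 then
        let v := mem.getD col 0 + 1          -- mem[col] = mem.get(col, 0) + 1
        let mem := mem.insert col v
        let new_header := new_header ++ [col ++ PySem.Int.toStr v]
        let error := if v == 1 then error ++ [pvWarn col] else error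
        (error, new_header, mem)
      else
        (error, new_header ++ [col], mem))
    (([] : List String), ([] : List String), (PySem.Dict.empty : PySem.Dict String Int))
  (r.2.1, rows, r.1)

-- ===== PORT B =====
def remove_doubles_alt (header : List String) (rows : List (List String)) : List String × List (List String) × List String :=
  let counts := header.foldl (fun d col => d.insert col (d.getD col 0 + 1)) (PySem.Dict.empty : PySem.Dict String Int)
  let totals := counts                        -- totals = dict(counts)
  -- state (new_header, error, counts); loop over reversed(header)
  let r := header.reverse.foldl (fun st col =>
      let new_header := st.1
      let error := st.2.1
      let cnt := st.2.2
      let k := cnt.getD col 0                 -- counts[col]; col is always a key here, exact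
      let cnt := cnt.insert col (k - 1)
      if totals.getD col 0 > 1 then           -- totals[col]; col is always a key here, exact
        (new_header ++ [col ++ PySem.Int.toStr k],
         if k == 1 then error ++ [pvWarn col] else error,
         cnt)
      else
        (new_header ++ [col], error, cnt))
    (([] : List String), ([] : List String), counts)
  (r.1.reverse, rows, r.2.1.reverse)

-- ===== PRECONDITION & SPEC =====
def Spec_remove_doubles (header : List String) (rows : List (List String)) (out : List String × List (List String) × List String) : Prop := out = remove_doubles_alt header rows
instance (header : List String) (rows : List (List String)) (out : List String × List (List String) × List String) : Decidable (Spec_remove_doubles header rows out) := by unfold Spec_remove_doubles; infer_instance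

-- ===== CLAIM (what is proved, stated in full; the proofs are below) =====
def Claim_equal_remove_doubles : Prop := ∀ (header : List String) (rows : List (List String)), Dom_remove_doubles header rows → Spec_remove_doubles header rows (remove_doubles header rows)

-- ===== LEMMAS AND PROOFS =====

-- named copies of the two loop bodies (definitionally the lambdas in the ports)
def stepA (header : List String) (st : List String × List String × PySem.Dict String Int) (col : String) : List String × List String × PySem.Dict String Int :=
  let error := st.1
  let new_header := st.2.1
  let mem := st.2.2
  if PySem.List.count header col > 1 then
    let v := mem.getD col 0 + 1
    let mem := mem.insert col v
    let new_header := new_header ++ [col ++ PySem.Int.toStr v]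
    let error := if v == 1 then error ++ [pvWarn col] else error
    (error, new_header, mem)
  else
    (error, new_header ++ [col], mem)

def stepB (totals : PySem.Dict String Int) (st : List String × List String × PySem.Dict String Int) (col : String) : List String × List String × PySem.Dict String Int :=
  let new_header := st.1
  let error := st.2.1
  let cnt := st.2.2
  let k := cnt.getD col 0
  let cnt := cnt.insert col (k - 1)
  if totals.getD col 0 > 1 then
    (new_header ++ [col ++ PySem.Int.toStr k],
     if k == 1 then error ++ [pvWarn col] else error,
     cnt)
  else
    (new_header ++ [col], error, cnt)

-- functional specification of the result, recursing over the columns with the processed prefix p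
def nhS (H : List String) (p : List String) : List String → List String
  | [] => []
  | c :: s => (if PySem.List.count H c > 1 then c ++ PySem.Int.toStr (PySem.List.count p c + 1) else c) :: nhS H (p ++ [c]) s

def errS (H : List String) (p : List String) : List String → List String
  | [] => []
  | c :: s => (if PySem.List.count H c > 1 ∧ PySem.List.count p c = 0 then [pvWarn c] else []) ++ errS H (p ++ [c]) s

theorem count_snoc (p : List String) (a x : String) :
    PySem.List.count (p ++ [a]) x = PySem.List.count p x + (if x = a then 1 else 0) := by
  simp [PySem.List.count_eq, List.count_append, List.count_singleton]
  split_ifs <;> simp_all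

theorem nhS_snoc (H : List String) : ∀ (s p : List String) (c : String),
    nhS H p (s ++ [c]) = nhS H p s ++ [if PySem.List.count H c > 1 then c ++ PySem.Int.toStr (PySem.List.count (p ++ s) c + 1) else c] := by
  intro s
  induction s with
  | nil => intro p c; simp [nhS]
  | cons a s ih =>
    intro p c
    simp only [List.cons_append, nhS, ih (p ++ [a]) c, List.append_assoc]
    simp

theorem errS_snoc (H : List String) : ∀ (s p : List String) (c : String),
    errS H p (s ++ [c]) = errS H p s ++ (if PySem.List.count H c > 1 ∧ PySem.List.count (p ++ s) c = 0 then [pvWarn c] else []) := by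
  intro s
  induction s with
  | nil => intro p c; simp [errS]
  | cons a s ih =>
    intro p c
    simp only [List.cons_append, errS, ih (p ++ [a]) c, List.append_assoc]
    simp

theorem A_loop (H : List String) : ∀ (s p e nh : List String) (mem : PySem.Dict String Int),
    (∀ c, PySem.List.count H c > 1 → mem.getD c 0 = PySem.List.count p c) →
    (s.foldl (stepA H) (e, nh, mem)).1 = e ++ errS H p s ∧
    (s.foldl (stepA H) (e, nh, mem)).2.1 = nh ++ nhS H p s := by
  intro s
  induction s with
  | nil => intro p e nh mem hinv; simp [errS, nhS]
  | cons c s ih =>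
    intro p e nh mem hinv
    simp only [List.foldl_cons]
    by_cases hc : PySem.List.count H c > 1
    · have hv : mem.getD c 0 = PySem.List.count p c := hinv c hc
      have hstep : stepA H (e, nh, mem) c =
          ((if ((PySem.List.count p c : Int) + 1) == 1 then e ++ [pvWarn c] else e),
           nh ++ [c ++ PySem.Int.toStr ((PySem.List.count p c : Int) + 1)],
           mem.insert c ((PySem.List.count p c : Int) + 1)) := by
        simp only [stepA, hv]
        rw [if_pos hc]
      have hinv' : ∀ x, PySem.List.count H x > 1 →
          (mem.insert c ((PySem.List.count p c : Int) + 1)).getD x 0 = PySem.List.count (p ++ [c]) x := by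
        intro x hx
        rw [PySem.Dict.getD_insert, count_snoc]
        by_cases hxc : x = c
        · simp [hxc]
        · simp [hxc, hinv x hx]
      obtain ⟨h1, h2⟩ := ih (p ++ [c]) _ _ _ hinv'
      rw [hstep]
      constructor
      · rw [h1, errS]
        have hc' : 1 < List.count c H := by simpa [PySem.List.count_eq] using hc
        by_cases h0 : PySem.List.count p c = 0
        · have h0' : List.count c p = 0 := by simpa [PySem.List.count_eq] using h0
          simp [h0', hc']
        · have h0' : ¬ List.count c p = 0 := by simpa [PySem.List.count_eq] using h0
          have hne : (((List.count c p : Int) + 1) == 1) = false := by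
            simp only [beq_eq_false_iff_ne, ne_eq]
            omega
          simp [h0', hc', hne]
      · rw [h2, nhS]
        have hc' : 1 < List.count c H := by simpa [PySem.List.count_eq] using hc
        simp [hc']
    · have hstep : stepA H (e, nh, mem) c = (e, nh ++ [c], mem) := by
        simp only [stepA]
        rw [if_neg hc]
      have hinv' : ∀ x, PySem.List.count H x > 1 →
          mem.getD x 0 = PySem.List.count (p ++ [c]) x := by
        intro x hx
        rw [count_snoc]
        have hxc : ¬ x = c := by intro h; subst h; exact hc hx
        simp [hxc, hinv x hx]
      obtain ⟨h1, h2⟩ := ih (p ++ [c]) _ _ _ hinv'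
      rw [hstep]
      constructor
      · rw [h1, errS]
        have : ¬ (PySem.List.count H c > 1 ∧ PySem.List.count p c = 0) := fun h => hc h.1
        rw [if_neg this]
        simp
      · rw [h2, nhS]
        rw [if_neg hc]
        simp

theorem B_app (T : PySem.Dict String Int) : ∀ (r : List String) (nh e : List String) (cnt : PySem.Dict String Int),
    r.foldl (stepB T) (nh, e, cnt) =
      (nh ++ (r.foldl (stepB T) ([], [], cnt)).1,
       e ++ (r.foldl (stepB T) ([], [], cnt)).2.1,
       (r.foldl (stepB T) ([], [], cnt)).2.2) := by
  intro r
  induction r with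
  | nil => intro nh e cnt; simp
  | cons c r ih =>
    intro nh e cnt
    simp only [List.foldl_cons, stepB]
    by_cases hT : T.getD c 0 > 1
    · rw [if_pos hT, if_pos hT]
      by_cases hk : (cnt.getD c 0 == 1) = true
      · rw [if_pos hk, if_pos hk]
        simp only [List.nil_append]
        rw [ih (nh ++ _) (e ++ _) _, ih [_] [_] _]
        simp
      · rw [if_neg hk, if_neg hk]
        simp only [List.nil_append]
        rw [ih (nh ++ _) e _, ih [_] [] _]
        simp
    · rw [if_neg hT, if_neg hT]
      simp only [List.nil_append]
      rw [ih (nh ++ _) e _, ih [_] [] _]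
      simp

theorem B_loop (H : List String) (T : PySem.Dict String Int)
    (hT : ∀ c, T.getD c 0 = PySem.List.count H c) :
    ∀ (r p : List String) (cnt : PySem.Dict String Int),
    (∀ c, cnt.getD c 0 = PySem.List.count (p ++ r.reverse) c) →
    (r.foldl (stepB T) ([], [], cnt)).1 = (nhS H p r.reverse).reverse ∧
    (r.foldl (stepB T) ([], [], cnt)).2.1 = (errS H p r.reverse).reverse := by
  intro r
  induction r with
  | nil => intro p cnt _; simp [nhS, errS]
  | cons c r ih =>
    intro p cnt hinv
    have hrev : (c :: r).reverse = r.reverse ++ [c] := by simp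
    have hk : cnt.getD c 0 = (PySem.List.count (p ++ r.reverse) c : Int) + 1 := by
      have h := hinv c
      rw [hrev, ← List.append_assoc, count_snoc] at h
      simpa using h
    have hinv' : ∀ x, (cnt.insert c (cnt.getD c 0 - 1)).getD x 0 = PySem.List.count (p ++ r.reverse) x := by
      intro x
      rw [PySem.Dict.getD_insert]
      by_cases hxc : x = c
      · subst hxc
        rw [if_pos rfl, hk]
        omega
      · rw [if_neg hxc]
        have h := hinv x
        rw [hrev, ← List.append_assoc, count_snoc, if_neg hxc] at h
        simpa using h
    obtain ⟨ih1, ih2⟩ := ih p (cnt.insert c (cnt.getD c 0 - 1)) hinv'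
    rw [hrev, nhS_snoc, errS_snoc, List.reverse_append, List.reverse_append]
    simp only [List.foldl_cons, stepB]
    by_cases hc : PySem.List.count H c > 1
    · have hc' : T.getD c 0 > 1 := by rw [hT]; exact_mod_cast hc
      rw [if_pos hc']
      by_cases h0 : PySem.List.count (p ++ r.reverse) c = 0
      · have hk1 : (cnt.getD c 0 == 1) = true := by rw [hk, h0]; simp
        rw [if_pos hk1]
        simp only [List.nil_append]
        rw [B_app T r [_] [_] _, ih1, ih2]
        constructor
        · rw [if_pos hc, hk, h0]
          simp
        · rw [if_pos ⟨hc, h0⟩]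
          simp
      · have hk1 : (cnt.getD c 0 == 1) = false := by
          rw [hk]
          simp only [beq_eq_false_iff_ne, ne_eq]
          omega
        rw [if_neg (by simp [hk1])]
        simp only [List.nil_append]
        rw [B_app T r [_] [] _, ih1, ih2]
        constructor
        · rw [if_pos hc, hk]
          simp
        · rw [if_neg (fun h => h0 h.2)]
          simp
    · have hc' : ¬ T.getD c 0 > 1 := by rw [hT]; exact_mod_cast hc
      rw [if_neg hc']
      simp only [List.nil_append]
      rw [B_app T r [_] [] _, ih1, ih2]
      constructor
      · rw [if_neg hc]
        simp
      · rw [if_neg (fun h => hc h.1)]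
        simp

-- ===== VERDICT (by name: the statement is the Claim_ definition above) =====
theorem remove_doubles_spec : Claim_equal_remove_doubles := by
  intro header rows _
  unfold Spec_remove_doubles
  have hA : remove_doubles header rows =
      ((header.foldl (stepA header) ([], [], (PySem.Dict.empty : PySem.Dict String Int))).2.1, rows,
       (header.foldl (stepA header) ([], [], (PySem.Dict.empty : PySem.Dict String Int))).1) := rfl
  set T0 := header.foldl (fun d col => d.insert col (d.getD col 0 + 1)) (PySem.Dict.empty : PySem.Dict String Int) with hT0
  have hB : remove_doubles_alt header rows =
      ((header.reverse.foldl (stepB T0) ([], [], T0)).1.reverse, rows,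
       (header.reverse.foldl (stepB T0) ([], [], T0)).2.1.reverse) := rfl
  have hT : ∀ c, T0.getD c 0 = (PySem.List.count header c : Int) := by
    intro c
    rw [hT0, PySem.Dict.getD_foldl_insert_add_one]
    simp [PySem.List.count_eq]
  obtain ⟨a1, a2⟩ := A_loop header header [] [] [] PySem.Dict.empty
    (by intro c _; simp [PySem.List.count_eq])
  obtain ⟨b1, b2⟩ := B_loop header T0 hT header.reverse [] T0
    (by intro c; simpa using hT c)
  rw [List.reverse_reverse] at b1 b2
  rw [hA, hB, a1, a2, b1, b2]
  simp
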